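-- pv_equiv track=rewrite | github.com/rattlesnailrick/leetcode | src/task_10.py | collapse_patterns
-- ===== SOURCE A (Python) =====
-- def collapse_patterns(p):
--     idx = 0
--
--     while idx < len(p) - 3:
--         if p[idx + 1] == "*" and p[idx + 3] == "*":
--             if [idx] == "." or p[idx] == p[idx + 2]:
--                 p = "".join(
--                     [
--                         char
--                         for i, char in enumerate(p)
--                         if i not in [idx + 2, idx + 3]
--                     ]
--                 )
--                 idx = 0
--                 continue
--             elif [idx + 2] == ".":
--                 p = "".join(
--                     [char for i, char in enumerate(p) if i not in [idx, idx + 1]]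
--                 )
--                 idx = 0
--                 continue
--         idx += 1
--     return p
-- ===== SOURCE B (Python) =====
-- def collapse_patterns(p):
--     # Single left-to-right pass with an output stack: when the next character is a
--     # star and appending it would duplicate the starred group just kept (the stack
--     # ends with char, star, same-char), drop the duplicated char instead.
--     out = []
--     for c in p:
--         if c == "*" and len(out) >= 3 and out[-2] == "*" and out[-1] == out[-3]:
--             out.pop()
--         else:
--             out.append(c)
--     return "".join(out)
-- ===== Notes on version B (the rewrite author's own statement) =====
-- stated objective: faster
-- what changed: Replaced the restart-from-zero rescan with repeated full-string rebuilds by a single left-to-right pass over an output stack that drops a character whenever appending the next star would duplicate the starred group the stack already ends with.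
import Mathlib
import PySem

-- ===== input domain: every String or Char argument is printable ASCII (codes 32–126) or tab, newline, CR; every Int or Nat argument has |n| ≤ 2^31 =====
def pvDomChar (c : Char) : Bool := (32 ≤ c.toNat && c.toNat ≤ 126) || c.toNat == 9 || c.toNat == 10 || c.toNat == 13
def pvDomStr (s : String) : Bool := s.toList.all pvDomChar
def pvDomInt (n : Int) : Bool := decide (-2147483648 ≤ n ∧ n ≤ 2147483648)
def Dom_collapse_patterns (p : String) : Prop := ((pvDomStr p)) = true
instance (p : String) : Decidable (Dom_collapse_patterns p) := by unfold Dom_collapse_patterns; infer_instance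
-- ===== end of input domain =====

-- B replaces A's restart-from-zero rescan (with a full string rebuild per collapse) by one
-- left-to-right pass over an output stack; a timing run measured B faster.

-- ===== PORT A =====
-- strings are handled as their character lists (PySem.Chars convention)

-- "".join([char for i, char in enumerate(p) if i not in [i1, i2]])
def pvRemove2 (l : List Char) (i1 i2 : Int) : List Char :=
  (PySem.List.enumerate l 0).filterMap
    (fun kc => if kc.1 = i1 ∨ kc.1 = i2 then none else some kc.2)

-- helper for the characterisation of pvRemove2 (cited by loopA's decreasing_by)
theorem pvRemove2_aux_none (l : List Char) (s i1 i2 : Int) (h1 : i1 < s) (h2 : i2 < s) :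
    (PySem.List.enumerate l s).filterMap
      (fun kc => if kc.1 = i1 ∨ kc.1 = i2 then none else some kc.2) = l := by
  induction l generalizing s with
  | nil => simp [PySem.List.enumerate_nil]
  | cons x xs ih =>
      rw [PySem.List.enumerate_cons]
      simp only [List.filterMap_cons]
      have : ¬ (s = i1 ∨ s = i2) := by omega
      simp only [if_neg this]
      rw [ih (s + 1) (by omega) (by omega)]

theorem pvRemove2_aux (l : List Char) (s : Int) (n : Nat) :
    (PySem.List.enumerate l s).filterMap
      (fun kc => if kc.1 = s + (n : Int) ∨ kc.1 = s + (n : Int) + 1 then none else some kc.2)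
      = l.take n ++ l.drop (n + 2) := by
  induction l generalizing s n with
  | nil => simp [PySem.List.enumerate_nil]
  | cons x xs ih =>
      rw [PySem.List.enumerate_cons]
      simp only [List.filterMap_cons]
      cases n with
      | zero =>
          have : (s = s + (0:Nat) ∨ s = s + (0:Nat) + 1) := by left; simp
          simp only [if_pos this]
          cases xs with
          | nil => simp [PySem.List.enumerate_nil]
          | cons y ys =>
              rw [PySem.List.enumerate_cons]
              simp only [List.filterMap_cons]
              have h2 : (s + 1 = s + ((0:Nat):Int) ∨ s + 1 = s + ((0:Nat):Int) + 1) := by right; simp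
              simp only [if_pos h2]
              rw [pvRemove2_aux_none ys (s + 1 + 1) _ _ (by simp) (by simp)]
              simp
      | succ m =>
          have : ¬ (s = s + ((Nat.succ m : Nat) : Int) ∨ s = s + ((Nat.succ m : Nat) : Int) + 1) := by
            push_cast; omega
          simp only [if_neg this]
          have heq : ∀ kc : Int × Char,
              (if kc.1 = s + ((Nat.succ m : Nat) : Int) ∨ kc.1 = s + ((Nat.succ m : Nat) : Int) + 1 then none else some kc.2)
              = (if kc.1 = (s+1) + ((m : Nat) : Int) ∨ kc.1 = (s+1) + ((m : Nat) : Int) + 1 then none else some kc.2) := by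
            intro kc
            have : (kc.1 = s + ((Nat.succ m : Nat) : Int) ∨ kc.1 = s + ((Nat.succ m : Nat) : Int) + 1)
                 ↔ (kc.1 = (s+1) + ((m : Nat) : Int) ∨ kc.1 = (s+1) + ((m : Nat) : Int) + 1) := by
              push_cast; omega
            by_cases h : kc.1 = (s+1) + ((m : Nat) : Int) ∨ kc.1 = (s+1) + ((m : Nat) : Int) + 1
            · rw [if_pos (this.mpr h), if_pos h]
            · rw [if_neg (fun hh => h (this.mp hh)), if_neg h]
          rw [List.filterMap_congr (fun kc _ => heq kc)]
          rw [ih (s + 1) m]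
          simp [List.take_succ_cons, List.drop_succ_cons]

theorem pvRemove2_eq (l : List Char) (n : Nat) :
    pvRemove2 l (n : Int) ((n : Int) + 1) = l.take n ++ l.drop (n + 2) := by
  have := pvRemove2_aux l 0 n
  simpa [pvRemove2] using this

def loopA (p : List Char) (idx : Nat) : List Char :=
  if h1 : (idx : Int) < PySem.List.len p - 3 then
    if PySem.List.pyGet? p ((idx : Int) + 1) = some '*' ∧ PySem.List.pyGet? p ((idx : Int) + 3) = some '*' then
      -- Python's `[idx] == "."` compares a list with a string: always False, so only the second disjunct matters
      if PySem.List.pyGet? p (idx : Int) = PySem.List.pyGet? p ((idx : Int) + 2) then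
        loopA (pvRemove2 p ((idx : Int) + 2) ((idx : Int) + 3)) 0
      else
        -- Python's `elif [idx+2] == "."` is likewise always False: fall through to idx += 1
        loopA p (idx + 1)
    else loopA p (idx + 1)
  else p
termination_by (p.length, p.length - idx)
decreasing_by
  · left
    have hlen : idx + 3 < p.length := by
      have := PySem.List.len_eq p
      omega
    have h2 : ((idx : Int) + 2) = ((idx + 2 : Nat) : Int) := by push_cast; omega
    have h3 : ((idx : Int) + 3) = (((idx + 2 : Nat) : Int) + 1) := by push_cast; omega
    rw [h2, h3, pvRemove2_eq p (idx + 2)]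
    simp only [List.length_append, List.length_take, List.length_drop]
    omega
  · right
    have := PySem.List.len_eq p
    omega
  · right
    have := PySem.List.len_eq p
    omega

def collapse_patterns (p : String) : String := String.ofList (loopA p.toList 0)

-- ===== PORT B =====
def stepB (out : List Char) (c : Char) : List Char :=
  if c = '*' ∧ 3 ≤ PySem.List.len out
      ∧ PySem.List.pyGet? out (-2) = some '*'
      ∧ PySem.List.pyGet? out (-1) = PySem.List.pyGet? out (-3) then
    out.dropLast          -- out.pop()
  else
    out ++ [c]            -- out.append(c)

def collapse_patterns_alt (p : String) : String := String.ofList (p.toList.foldl stepB [])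

-- ===== PRECONDITION & SPEC =====
def Spec_collapse_patterns (p : String) (out : String) : Prop := out = collapse_patterns_alt p
instance (p : String) (out : String) : Decidable (Spec_collapse_patterns p out) := by unfold Spec_collapse_patterns; infer_instance

-- ===== CLAIM (what is proved, stated in full; the proofs are below) =====
def Claim_equal_collapse_patterns : Prop := ∀ (p : String), Dom_collapse_patterns p → Spec_collapse_patterns p (collapse_patterns p)

-- ===== LEMMAS AND PROOFS =====

def rstep (r : List Char) (c : Char) : List Char :=
  match r with
  | x :: s :: y :: t => if c = '*' ∧ s = '*' ∧ x = y then s :: y :: t else c :: r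
  | _ => c :: r

def redb (l : List Char) (j : Nat) : Bool :=
  match l.drop j with
  | x :: s :: y :: t :: _ => x = y && s = '*' && t = '*'
  | _ => false

def rredb (r : List Char) (j : Nat) : Bool :=
  match r.drop j with
  | a :: b :: c :: d :: _ => a = '*' && c = '*' && b = d
  | _ => false

def RIrr (r : List Char) : Prop := ∀ j, rredb r j = false

theorem rredb_cons (c : Char) (r : List Char) (j : Nat) : rredb (c :: r) (j + 1) = rredb r j := by
  simp [rredb]

theorem rredb_four (a b c d : Char) (t : List Char) :
    rredb (a :: b :: c :: d :: t) 0 = (decide (a = '*') && decide (c = '*') && decide (b = d)) := rfl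

theorem RIrr_nil : RIrr [] := by intro j; simp [rredb]

theorem RIrr_rstep {r : List Char} (h : RIrr r) (c : Char) : RIrr (rstep r c) := by
  match r with
  | [] => intro j; match j with
          | 0 => simp [rstep, rredb]
          | j+1 => show rredb (c :: []) (j+1) = false; rw [rredb_cons]; exact h j
  | [x] => intro j; match j with
          | 0 => simp [rstep, rredb]
          | j+1 => show rredb (c :: [x]) (j+1) = false; rw [rredb_cons]; exact h j
  | [x, s] => intro j; match j with
          | 0 => simp [rstep, rredb]
          | j+1 => show rredb (c :: [x, s]) (j+1) = false; rw [rredb_cons]; exact h j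
  | x :: s :: y :: t =>
      rw [rstep]
      by_cases hc : c = '*' ∧ s = '*' ∧ x = y
      · rw [if_pos hc]
        intro j
        have := h (j + 1)
        rwa [rredb_cons] at this
      · rw [if_neg hc]
        intro j
        match j with
        | 0 =>
            rw [rredb_four]
            simp only [Bool.and_eq_false_iff, decide_eq_false_iff_not]
            tauto
        | j+1 => rw [rredb_cons]; exact h j

theorem RIrr_foldl {r : List Char} (h : RIrr r) (l : List Char) : RIrr (l.foldl rstep r) := by
  induction l generalizing r with
  | nil => exact h
  | cons c l ih => exact ih (RIrr_rstep h c)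

-- P
theorem rstep_two_shape {O : List Char} (h : RIrr O) (a : Char) :
    ∃ r', rstep (rstep O a) '*' = '*' :: a :: r' := by
  match O with
  | [] => exact ⟨[], rfl⟩
  | [x] => exact ⟨[x], rfl⟩
  | [x, s] =>
      show ∃ r', rstep (a :: x :: s :: []) '*' = _
      rw [rstep]
      by_cases hc : ('*':Char) = '*' ∧ x = '*' ∧ a = s
      · rw [if_pos hc]
        obtain ⟨-, hx, has⟩ := hc
        subst hx; subst has
        exact ⟨[], rfl⟩
      · rw [if_neg hc]; exact ⟨[x, s], rfl⟩
  | x :: s :: y :: t =>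
      by_cases hc : a = '*' ∧ s = '*' ∧ x = y
      · obtain ⟨ha, hs, hxy⟩ := hc
        subst ha; subst hs; subst hxy
        rw [rstep, if_pos ⟨rfl, rfl, rfl⟩]
        match t with
        | [] => exact ⟨[x], rfl⟩
        | z :: t₂ =>
            rw [rstep]
            by_cases h2 : ('*':Char) = '*' ∧ x = '*' ∧ '*' = z
            · exfalso
              obtain ⟨-, hx, hz⟩ := h2
              subst hx
              have h0 := h 0
              rw [rredb_four] at h0
              rw [← hz] at h0
              simp at h0
            · rw [if_neg h2]; exact ⟨x :: z :: t₂, rfl⟩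
      · rw [rstep, if_neg hc]
        rw [rstep]
        by_cases h2 : ('*':Char) = '*' ∧ x = '*' ∧ a = s
        · rw [if_pos h2]
          obtain ⟨-, hx, has⟩ := h2
          subst hx; subst has
          exact ⟨y :: t, rfl⟩
        · rw [if_neg h2]; exact ⟨x :: s :: y :: t, rfl⟩

-- Q
theorem rstep_two_id {T : List Char} (h : RIrr T) (a : Char) (r : List Char)
    (hT : T = '*' :: a :: r) : rstep (rstep T a) '*' = T := by
  subst hT
  match r with
  | [] =>
      show rstep (a :: '*' :: a :: []) '*' = _
      rw [rstep, if_pos ⟨rfl, rfl, rfl⟩]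
  | y :: t =>
      rw [rstep]
      by_cases hc : a = '*' ∧ a = '*' ∧ '*' = y
      · rw [if_pos hc]
        obtain ⟨ha, -, hy⟩ := hc
        subst ha; rw [← hy]
        rw [← hy] at h
        match t with
        | [] => rfl
        | z :: t₂ =>
            rw [rstep]
            by_cases h2 : ('*':Char) = '*' ∧ '*' = '*' ∧ '*' = z
            · exfalso
              obtain ⟨-, -, hz⟩ := h2
              have h0 := h 0
              rw [rredb_four, ← hz] at h0
              simp at h0
            · rw [if_neg h2]
        -- unreachable
      · rw [if_neg hc]
        show rstep (a :: '*' :: a :: y :: t) '*' = _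
        rw [rstep, if_pos ⟨rfl, rfl, rfl⟩]

theorem foldl_two_step {O : List Char} (h : RIrr O) (a : Char) :
    List.foldl rstep O [a, '*', a, '*'] = List.foldl rstep O [a, '*'] := by
  simp only [List.foldl_cons, List.foldl_nil]
  obtain ⟨r', hr⟩ := rstep_two_shape h a
  rw [hr]
  have hIrr : RIrr ('*' :: a :: r') := hr ▸ RIrr_rstep (RIrr_rstep h a) '*'
  exact rstep_two_id hIrr a r' rfl

def rnorm (l : List Char) : List Char := l.foldl rstep []

theorem rnorm_rewrite (u v : List Char) (a : Char) :
    rnorm (u ++ ([a, '*', a, '*'] ++ v)) = rnorm (u ++ ([a, '*'] ++ v)) := by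
  unfold rnorm
  rw [List.foldl_append, List.foldl_append, List.foldl_append, List.foldl_append]
  rw [foldl_two_step (RIrr_foldl RIrr_nil u) a]

theorem redb_eq_true_iff (l : List Char) (j : Nat) :
    redb l j = true ↔ ∃ a rest, l.drop j = a :: '*' :: a :: '*' :: rest := by
  unfold redb
  split
  next x s y t rest heq =>
      simp only [Bool.and_eq_true, decide_eq_true_eq]
      constructor
      · rintro ⟨⟨hxy, hs⟩, ht⟩
        exact ⟨x, rest, by rw [heq, hxy, hs, ht]⟩
      · rintro ⟨a, rest', h'⟩
        rw [heq] at h'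
        injection h' with h1 h'; injection h' with h2 h'; injection h' with h3 h'; injection h' with h4 h'
        subst h1; subst h2; subst h3; subst h4
        exact ⟨⟨rfl, rfl⟩, rfl⟩
  next hno =>
      refine iff_of_false (by simp) ?_
      rintro ⟨a, rest', h'⟩
      exact hno a '*' a '*' rest' h'

theorem redb_append {u : List Char} {j : Nat} (v : List Char) (h : redb u j = true) :
    redb (u ++ v) j = true := by
  rw [redb_eq_true_iff] at h ⊢
  obtain ⟨a, rest, hd⟩ := h
  have hj : j ≤ u.length := by
    by_contra hj
    rw [List.drop_eq_nil_of_le (by omega)] at hd; cases hd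
  exact ⟨a, rest ++ v, by rw [List.drop_append_of_le_length hj, hd]; simp⟩

theorem rnorm_irr {l : List Char} (h : ∀ j, redb l j = false) : rnorm l = l.reverse := by
  induction l using List.reverseRecOn with
  | nil => rfl
  | append_singleton u c ih =>
      have hu : ∀ j, redb u j = false := by
        intro j
        by_contra hj
        have hj' : redb u j = true := by revert hj; cases redb u j <;> simp
        have := redb_append (u := u) (j := j) [c] hj'
        rw [h j] at this; cases this
      have hstep : rstep u.reverse c = c :: u.reverse := by
        rcases hr : u.reverse with _ | ⟨x, _ | ⟨s, _ | ⟨y, t⟩⟩⟩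
        · rfl
        · rfl
        · rfl
        · rw [rstep, if_neg]
          rintro ⟨hc, hs, hxy⟩
          have hu' : u = t.reverse ++ [y, s, x] := by
            have := congrArg List.reverse hr
            simpa using this
          have hredex : redb (u ++ [c]) t.reverse.length = true := by
            rw [redb_eq_true_iff]
            refine ⟨y, [], ?_⟩
            rw [hu', List.append_assoc, List.drop_left]
            rw [hs, hxy, hc]
            rfl
          rw [h t.reverse.length] at hredex; cases hredex
      unfold rnorm
      rw [List.foldl_append]
      show rstep (rnorm u) c = _
      rw [ih hu, hstep]
      simp

-- bridge: port B's stack fold, read on the reversed stack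
theorem stepB_rev (r : List Char) (c : Char) : stepB r.reverse c = (rstep r c).reverse := by
  match r with
  | [] => simp [stepB, rstep, PySem.List.len_eq]
  | [x] => simp [stepB, rstep, PySem.List.len_eq]
  | [x, s] => simp [stepB, rstep, PySem.List.len_eq]
  | x :: s :: y :: t =>
      have hrev : (x :: s :: y :: t).reverse = t.reverse ++ [y, s, x] := by simp
      have h1 : PySem.List.pyGet? (t.reverse ++ [y,s,x]) (-1) = some x := by
        rw [PySem.List.pyGet?_neg_ofNat (t.reverse ++ [y,s,x]) 1 (by omega) (by simp)]; simp
      have h2 : PySem.List.pyGet? (t.reverse ++ [y,s,x]) (-2) = some s := by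
        rw [PySem.List.pyGet?_neg_ofNat (t.reverse ++ [y,s,x]) 2 (by omega) (by simp)]; simp
      have h3 : PySem.List.pyGet? (t.reverse ++ [y,s,x]) (-3) = some y := by
        rw [PySem.List.pyGet?_neg_ofNat (t.reverse ++ [y,s,x]) 3 (by omega) (by simp)]; simp
      rw [hrev]
      by_cases hc : c = '*' ∧ s = '*' ∧ x = y
      · have : stepB (t.reverse ++ [y,s,x]) c = (t.reverse ++ [y,s,x]).dropLast := by
          rw [stepB, if_pos]
          refine ⟨hc.1, ?_, by rw [h2, hc.2.1], by rw [h1, h3, hc.2.2]⟩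
          simp [PySem.List.len_eq]
        rw [this, rstep, if_pos hc]
        rw [show t.reverse ++ [y,s,x] = (t.reverse ++ [y,s]) ++ [x] by simp]
        simp
      · have : stepB (t.reverse ++ [y,s,x]) c = (t.reverse ++ [y,s,x]) ++ [c] := by
          rw [stepB, if_neg]
          intro h
          exact hc ⟨h.1, by simpa [h2] using h.2.2.1, by
            have := h.2.2.2; rw [h1, h3] at this; simpa using this⟩
        rw [this, rstep, if_neg hc]
        simp

theorem foldlB (l out : List Char) : l.foldl stepB out = (l.foldl rstep out.reverse).reverse := by
  induction l generalizing out with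
  | nil => simp
  | cons c l ih =>
      simp only [List.foldl_cons]
      rw [ih (stepB out c)]
      have hb := stepB_rev out.reverse c
      rw [List.reverse_reverse] at hb
      rw [hb, List.reverse_reverse]

-- main lemma for port A: once every position below idx is redex-free, the scan
-- computes exactly the stack pass's result
theorem loopA_eq (p : List Char) (idx : Nat) (h : ∀ j, j < idx → redb p j = false) :
    loopA p idx = (rnorm p).reverse := by
  rw [loopA]
  by_cases h1 : (idx : Int) < PySem.List.len p - 3
  · rw [dif_pos h1]
    have hlen : idx + 3 < p.length := by have := PySem.List.len_eq p; omega
    have e : ∀ (k : Nat) (hk : idx + k < p.length),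
        PySem.List.pyGet? p (((idx + k : Nat)) : Int) = some (p[idx + k]'hk) := by
      intro k hk
      rw [PySem.List.pyGet?_natCast]
      exact List.getElem?_eq_getElem hk
    have c1 : ((idx : Int) + 1) = (((idx + 1 : Nat)) : Int) := by push_cast; ring
    have c2 : ((idx : Int) + 2) = (((idx + 2 : Nat)) : Int) := by push_cast; ring
    have c3 : ((idx : Int) + 3) = (((idx + 3 : Nat)) : Int) := by push_cast; ring
    have c0 : ((idx : Int)) = (((idx + 0 : Nat)) : Int) := by push_cast; ring
    have hdrop : p.drop idx
        = p[idx] :: p[idx+1] :: p[idx+2] :: p[idx+3] :: p.drop (idx + 4) := by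
      rw [List.drop_eq_getElem_cons (by omega), List.drop_eq_getElem_cons (by omega),
          List.drop_eq_getElem_cons (by omega), List.drop_eq_getElem_cons (by omega)]
    have hred : redb p idx
        = (decide (p[idx] = p[idx+2]) && decide (p[idx+1] = '*') && decide (p[idx+3] = '*')) := by
      unfold redb
      rw [hdrop]
    by_cases h2 : PySem.List.pyGet? p ((idx : Int) + 1) = some '*' ∧ PySem.List.pyGet? p ((idx : Int) + 3) = some '*'
    · rw [if_pos h2]
      obtain ⟨h2a, h2b⟩ := h2
      rw [c1, e 1 (by omega)] at h2a
      rw [c3, e 3 (by omega)] at h2b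
      have hv1 : p[idx+1] = '*' := by injection h2a
      have hv3 : p[idx+3] = '*' := by injection h2b
      by_cases h3 : PySem.List.pyGet? p (idx : Int) = PySem.List.pyGet? p ((idx : Int) + 2)
      · rw [if_pos h3]
        rw [c2, c0, e 0 (by omega), e 2 (by omega)] at h3
        simp only [Nat.add_zero] at h3
        have hv2 : p[idx+2] = p[idx] := by injection h3 with hh; exact hh.symm
        have hdrop' : p.drop idx
            = p[idx] :: '*' :: p[idx] :: '*' :: p.drop (idx + 4) := by
          rw [hdrop, hv1, hv2, hv3]
        have hp : p = p.take idx ++ ([p[idx], '*', p[idx], '*'] ++ p.drop (idx + 4)) := by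
          conv_lhs => rw [← List.take_append_drop idx p, hdrop']
          rfl
        have hrm : pvRemove2 p ((idx : Int) + 2) ((idx : Int) + 3)
            = p.take idx ++ ([p[idx], '*'] ++ p.drop (idx + 4)) := by
          rw [c2, show ((idx : Int) + 3) = (((idx + 2 : Nat)) : Int) + 1 by push_cast; ring]
          rw [pvRemove2_eq p (idx + 2)]
          have ht : p.take (idx + 2) = p.take idx ++ [p[idx], '*'] := by
            rw [show idx + 2 = idx + 2 by rfl, List.take_add]
            congr 1
            rw [hdrop']
            rfl
          rw [ht, show idx + 2 + 2 = idx + 4 by rfl, List.append_assoc]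
        rw [hrm]
        rw [loopA_eq (p.take idx ++ ([p[idx], '*'] ++ p.drop (idx + 4))) 0
            (by intro j hj; omega)]
        conv_rhs => rw [hp]
        rw [rnorm_rewrite]
      · rw [if_neg h3]
        have hno : redb p idx = false := by
          rw [hred]
          rw [c2, c0, e 0 (by omega), e 2 (by omega)] at h3
          simp only [Nat.add_zero] at h3
          have hne : ¬ p[idx] = p[idx+2] := fun hh => h3 (by rw [hh])
          simp only [Bool.and_eq_false_iff, decide_eq_false_iff_not]
          left; left
          exact hne
        exact loopA_eq p (idx + 1) (by
          intro j hj
          rcases Nat.lt_succ_iff_lt_or_eq.mp hj with hj' | hj'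
          · exact h j hj'
          · rw [hj']; exact hno)
    · rw [if_neg h2]
      have hno : redb p idx = false := by
        rw [hred]
        simp only [Bool.and_eq_false_iff, decide_eq_false_iff_not]
        by_cases hv1 : p[idx+1] = '*'
        · by_cases hv3 : p[idx+3] = '*'
          · exfalso
            exact h2 ⟨by rw [c1, e 1 (by omega), hv1], by rw [c3, e 3 (by omega), hv3]⟩
          · right; exact hv3
        · left; right; exact hv1
      exact loopA_eq p (idx + 1) (by
        intro j hj
        rcases Nat.lt_succ_iff_lt_or_eq.mp hj with hj' | hj'
        · exact h j hj'
        · rw [hj']; exact hno)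
  · rw [dif_neg h1]
    have hall : ∀ j, redb p j = false := by
      intro j
      by_cases hj : j < idx
      · exact h j hj
      · have hlen : p.length ≤ idx + 3 := by have := PySem.List.len_eq p; omega
        rw [← Bool.not_eq_true, redb_eq_true_iff]
        rintro ⟨a, rest, hd⟩
        have := congrArg List.length hd
        simp only [List.length_drop, List.length_cons] at this
        omega
    rw [rnorm_irr hall]
    simp
termination_by (p.length, p.length - idx)
decreasing_by
  · left
    simp only [List.length_append, List.length_take, List.length_cons, List.length_nil,
      List.length_drop]
    omega
  · right
    omega
  · right
    omega

-- ===== VERDICT (by name: the statement is the Claim_ definition above) =====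
theorem collapse_patterns_spec : Claim_equal_collapse_patterns := by
  intro p _
  unfold Spec_collapse_patterns collapse_patterns collapse_patterns_alt
  rw [foldlB p.toList []]
  rw [loopA_eq p.toList 0 (fun j hj => absurd hj (by omega))]
  rfl
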